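-- pv_equiv track=rewrite | github.com/KandelN/GoogleFoobar2020 | foo2a_LAMBs.py | solution
-- ===== SOURCE A (Python) =====
-- def solution(total_lambda):
--     N =total_lambda
--     if N == 1:
--         return 0
--
--     #fibonacci
--     a = 1
--     b = 1
--     sum = 2
--     counter1 = 2
--     while (sum <= N):
--         c = a+b
--         sum += c
--         counter1 += 1
--         a = b
--         b = c
--     counter1 -= 1
--
--     #doubles
--     a = 1
--     sum = 0
--     counter2 = 0
--     while (sum <= N):
--         sum += a
--         counter2 += 1
--         a = 2*a
--     counter2 -=1
--
--     return (counter1 - counter2)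
-- ===== SOURCE B (Python) =====
-- def solution(total_lambda):
--     N = total_lambda
--     if N == 1:
--         return 0
--     # counter1 = largest m >= 1 with Fib(m+2) <= N+1 (sum F(1..m) = F(m+2)-1)
--     target = N + 1
--     m, f, g = 1, 2, 3
--     while g <= target:
--         f, g = g, f + g
--         m += 1
--     # counter2 = floor(log2(N+1)) in closed form
--     return m - ((N + 1).bit_length() - 1)
-- ===== Notes on version B (the rewrite author's own statement) =====
-- stated objective: alternative
-- what changed: Replaces A's powers-of-two summing loop by the closed form (N+1).bit_length()-1 and A's four-variable Fibonacci-sum accumulator by a plain two-variable Fibonacci walk against N+1; Pre_ excludes negative lamb counts, which lie outside the task's natural domain and on which A's constant return value 2 is leftover loop state from two loops that never run.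
-- outside the precondition, e.g. on solution(-5): A returns 2, B returns -1
import Mathlib
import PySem

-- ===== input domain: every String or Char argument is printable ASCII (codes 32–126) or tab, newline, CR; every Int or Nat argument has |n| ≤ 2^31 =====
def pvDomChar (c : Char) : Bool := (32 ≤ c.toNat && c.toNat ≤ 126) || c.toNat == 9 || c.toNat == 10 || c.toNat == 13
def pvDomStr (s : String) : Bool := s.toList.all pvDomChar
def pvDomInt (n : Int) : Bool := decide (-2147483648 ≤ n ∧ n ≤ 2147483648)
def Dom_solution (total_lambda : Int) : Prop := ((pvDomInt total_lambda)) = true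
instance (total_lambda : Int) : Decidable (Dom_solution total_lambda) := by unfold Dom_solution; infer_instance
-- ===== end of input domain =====

-- B replaces A's doubling loop by the closed form floor(log2(N+1)) and A's Fibonacci-sum
-- accumulator by a two-variable Fibonacci walk; same return value on Pre_, similar cost (alternative).

-- ===== PORT A =====
-- A's fibonacci while-loop; fuel only makes it total (100 steps suffice for |N| ≤ 2^31)
def fibLoopA (N : Int) : Nat → Int → Int → Int → Int → Int
  | 0, _, _, _, c => c
  | fuel+1, a, b, sum, c =>
      if sum ≤ N then fibLoopA N fuel b (a+b) (sum+(a+b)) (c+1) else c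

-- A's doubling while-loop; fuel only makes it total
def dblLoopA (N : Int) : Nat → Int → Int → Int → Int
  | 0, _, _, c => c
  | fuel+1, a, sum, c =>
      if sum ≤ N then dblLoopA N fuel (2*a) (sum+a) (c+1) else c

def solution (total_lambda : Int) : Int :=
  if total_lambda = 1 then 0
  else (fibLoopA total_lambda 100 1 1 2 2 - 1) - (dblLoopA total_lambda 100 1 0 0 - 1)

-- ===== PORT B =====
-- B's single fibonacci walk: while g <= target: f, g = g, f+g; m += 1
def fibLoopB (N : Int) : Nat → Int → Int → Int → Int
  | 0, _, _, m => m
  | fuel+1, f, g, m =>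
      if g ≤ N + 1 then fibLoopB N fuel g (f+g) (m+1) else m

-- Python's int.bit_length (on a negative int it is the bit length of the absolute value)
def bitLen (n : Nat) : Nat := if n = 0 then 0 else Nat.log2 n + 1

def solution_alt (total_lambda : Int) : Int :=
  if total_lambda = 1 then 0
  else fibLoopB total_lambda 100 2 3 1 - ((bitLen (total_lambda + 1).natAbs : Int) - 1)

-- ===== PRECONDITION & SPEC =====
-- Pre_ excludes negative lamb counts: they are outside the task's natural domain, and there
-- A's constant return value 2 is leftover loop state from two while-loops that never run.
def Pre_solution (total_lambda : Int) : Prop := 0 ≤ total_lambda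
instance (total_lambda : Int) : Decidable (Pre_solution total_lambda) := by unfold Pre_solution; infer_instance

def pvWitness_solution : Int := 10

def Spec_solution (total_lambda : Int) (out : Int) : Prop := out = solution_alt total_lambda
instance (total_lambda : Int) (out : Int) : Decidable (Spec_solution total_lambda out) := by unfold Spec_solution; infer_instance

-- ===== CLAIM (what is proved, stated in full; the proofs are below) =====
def Claim_equal_solution : Prop := ∀ (total_lambda : Int), Dom_solution total_lambda → Pre_solution total_lambda → Spec_solution total_lambda (solution total_lambda)

-- ===== LEMMAS AND PROOFS =====

-- A's fibonacci loop (state a, b, sum = a+2b-1, c) tracks B's walk (f = a+b, g = a+2b, m = c-1).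
theorem fibLoopA_eq_fibLoopB (N : Int) :
    ∀ (fuel : Nat) (a b c : Int),
      fibLoopA N fuel a b (a + 2*b - 1) c = fibLoopB N fuel (a+b) (a + 2*b) (c-1) + 1 := by
  intro fuel
  induction fuel with
  | zero => intro a b c; simp [fibLoopA, fibLoopB]
  | succ n ih =>
      intro a b c
      by_cases h : a + 2*b - 1 ≤ N
      · have h' : a + 2*b ≤ N + 1 := by omega
        simp only [fibLoopA, fibLoopB, if_pos h, if_pos h']
        have e1 : a + 2*b - 1 + (a + b) = b + 2*(a+b) - 1 := by ring
        have := ih b (a+b) (c+1)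
        rw [e1, this]
        have e2 : b + (a+b) = a + 2*b := by ring
        have e3 : b + 2*(a+b) = (a+b) + (a + 2*b) := by ring
        have e4 : c + 1 - 1 = c - 1 + 1 := by ring
        rw [e2, e3, e4]
      · have h' : ¬ (a + 2*b ≤ N + 1) := by omega
        simp only [fibLoopA, fibLoopB, if_neg h, if_neg h']
        ring

-- once the condition fails the doubling loop returns its counter, at any fuel
theorem dblLoopA_exit (N : Int) (fuel : Nat) (a sum c : Int) (h : ¬ sum ≤ N) :
    dblLoopA N fuel a sum c = c := by
  cases fuel with
  | zero => rfl
  | succ n => simp [dblLoopA, if_neg h]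

-- with enough fuel, the doubling loop started at a power of two computes the bit length of N+1
theorem dblLoopA_bitLen (N : Int) :
    ∀ (fuel k : Nat), (2:Int)^k ≤ N + 1 → N + 1 < 2^(k+fuel) →
      dblLoopA N fuel ((2:Int)^k) ((2:Int)^k - 1) (k : Int) = (bitLen (N+1).toNat : Int) := by
  intro fuel
  induction fuel with
  | zero =>
      intro k h1 h2
      exfalso; simp only [Nat.add_zero] at h2; omega
  | succ n ih =>
      intro k h1 h2
      have hc : (2:Int)^k - 1 ≤ N := by omega
      simp only [dblLoopA, if_pos hc]
      have e1 : 2 * (2:Int)^k = 2^(k+1) := by rw [pow_succ]; ring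
      have e2 : (2:Int)^k - 1 + 2^k = 2^(k+1) - 1 := by rw [pow_succ]; ring
      rw [e1, e2]
      by_cases h3 : (2:Int)^(k+1) ≤ N + 1
      · have h4 : N + 1 < 2^(k+1+n) := by
          have : k + 1 + n = k + (n+1) := by omega
          rw [this]; exact h2
        have := ih (k+1) h3 h4
        push_cast at this ⊢
        convert this using 2
      · have hexit : dblLoopA N n ((2:Int)^(k+1)) ((2:Int)^(k+1) - 1) ((k:Int)+1) = (k:Int)+1 :=
          dblLoopA_exit N n _ _ _ (by omega)
        have : ((k:Int)+1) = ((k+1 : Nat) : Int) := by push_cast; ring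
        rw [this] at hexit
        have hres : dblLoopA N n ((2:Int)^(k+1)) ((2:Int)^(k+1) - 1) ((k:Int)+1)
            = ((k+1 : Nat) : Int) := by rw [← this] at hexit; rw [hexit, this]
        rw [hres]
        -- bit length of N+1 is k+1 since 2^k ≤ N+1 < 2^(k+1)
        have h2kpos : (0:Int) < 2^k := by positivity
        have ht : (1:Int) ≤ N + 1 := by omega
        set t : Nat := (N+1).toNat with hts
        have htn : ((t:Int)) = N + 1 := Int.toNat_of_nonneg (by omega)
        have hk1 : (2:Nat)^k ≤ t := by
          have : ((2:Nat)^k : Int) ≤ (t:Int) := by push_cast; rw [htn]; exact h1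
          exact_mod_cast this
        have hk2 : t < (2:Nat)^(k+1) := by
          have : ((t:Int)) < ((2:Nat)^(k+1) : Int) := by push_cast; rw [htn]; omega
          exact_mod_cast this
        have htne : t ≠ 0 := by
          have : (0:Nat) < 2^k := Nat.pow_pos (by norm_num)
          omega
        have hlog : Nat.log2 t = k := by
          rw [Nat.log2_eq_log_two]
          exact Nat.log_eq_of_pow_le_of_lt_pow hk1 hk2
        have hbl : bitLen t = k + 1 := by
          simp [bitLen, htne, hlog]
        rw [hbl]

-- ===== VERDICT (by name: the statement is the Claim_ definition above) =====
theorem solution_spec : Claim_equal_solution := by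
  intro N hDom hPre
  unfold Spec_solution solution solution_alt
  by_cases h1 : N = 1
  · simp [h1]
  · rw [if_neg h1, if_neg h1]
    have hfib : fibLoopA N 100 1 1 2 2 = fibLoopB N 100 2 3 1 + 1 := by
      have := fibLoopA_eq_fibLoopB N 100 1 1 2
      norm_num at this
      exact this
    have hn : 0 ≤ N := hPre
    have habs : (N + 1).natAbs = (N + 1).toNat := by omega
    have hdbl : dblLoopA N 100 1 0 0 - 1 = (bitLen (N + 1).toNat : Int) - 1 := by
      have hb : N + 1 < (2:Int)^(0+100) := by
        have hd : N ≤ 2147483648 := by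
          have := hDom
          unfold Dom_solution pvDomInt at this
          simp at this
          exact this.2
        calc N + 1 ≤ 2147483649 := by omega
          _ < (2:Int)^(0+100) := by norm_num
      have := dblLoopA_bitLen N 100 0 (by simpa using (by omega : (1:Int) ≤ N + 1)) hb
      norm_num at this
      rw [this]
    rw [hfib, habs, hdbl]
    ring
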